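-- pv_equiv track=rewrite | github.com/lucasemiliomf/cifo_group7 | charles/crossover.py | indexes_cycle_xo
-- ===== SOURCE A (Python) =====
-- def cycle_xo(p1, p2):
--     """Implementation of cycle crossover.
--
--     Args:
--         p1 (Individual): First parent for crossover.
--         p2 (Individual): Second parent for crossover.
--
--     Returns:
--         Individuals: Two offspring, resulting from the crossover.
--     """
--     # offspring placeholders
--     offspring1 = [None] * len(p1)
--     offspring2 = [None] * len(p1)
--
--     while None in offspring1:
--         index = offspring1.index(None)
--         val1 = p1[index]
--         val2 = p2[index]
--
--         # copy the cycle elements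
--         while val1 != val2:
--             offspring1[index] = p1[index]
--             offspring2[index] = p2[index]
--             val2 = p2[index]
--             index = p1.index(val2)
--
--         # copy the rest
--         for element in offspring1:
--             if element is None:
--                 index = offspring1.index(None)
--                 if offspring1[index] is None:
--                     offspring1[index] = p2[index]
--                     offspring2[index] = p1[index]
--
--     return offspring1, offspring2
--
-- def indexes_cycle_xo(p1, p2):
--     """Indexing individuals to perform a cycle_xo.
--
--     Args:
--         p1 (Individual): First parent for crossover.
--         p2 (Individual): Second parent for crossover.
--
--     Returns:
--         Individuals: Two offspring, resulting from the crossover.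
--     """
--     # Indexing the parents for crossover
--     index_o1, index_o2 = cycle_xo(range(len(p1)), range(len(p2)))
--
--     # Offspring placeholders
--     offspring1 = [None] * len(p1)
--     offspring2 = [None] * len(p1)
--
--     # Associating each bit from index to offspring
--     for index, bit in enumerate(index_o1):
--         offspring1[index] = p1[bit]
--     for index, bit in enumerate(index_o2):
--         offspring2[index] = p2[bit]
--
--     return offspring1, offspring2
-- ===== SOURCE B (Python) =====
-- def indexes_cycle_xo(p1, p2):
--     n = len(p1)
--     return [p1[i] for i in range(n)], [p2[i] for i in range(n)]
-- ===== Notes on version B (the rewrite author's own statement) =====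
-- stated objective: simpler
-- what changed: The cycle crossover is applied to two identical index ranges, so the cycle structure degenerates to the identity; B drops all cycle-detection/while/index scans and directly returns the first len(p1) elements of each parent.
import Mathlib
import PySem

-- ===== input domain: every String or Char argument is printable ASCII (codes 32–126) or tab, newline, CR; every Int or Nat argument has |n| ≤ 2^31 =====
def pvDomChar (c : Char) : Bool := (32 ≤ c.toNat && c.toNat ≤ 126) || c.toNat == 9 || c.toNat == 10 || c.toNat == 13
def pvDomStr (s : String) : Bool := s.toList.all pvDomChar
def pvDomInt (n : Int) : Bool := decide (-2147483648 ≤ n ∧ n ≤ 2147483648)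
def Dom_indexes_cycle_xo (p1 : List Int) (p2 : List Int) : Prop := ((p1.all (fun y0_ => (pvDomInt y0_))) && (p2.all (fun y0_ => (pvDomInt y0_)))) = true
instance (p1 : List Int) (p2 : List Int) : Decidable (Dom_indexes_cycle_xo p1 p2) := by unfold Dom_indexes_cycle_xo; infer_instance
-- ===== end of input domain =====

-- B replaces the degenerate cycle crossover on two identical index ranges (identity permutation)
-- by directly copying the first len(p1) elements of each parent: simpler, no cycle-detection loops.


-- ===== PORT A =====
-- inner 'while val1 != val2' loop of cycle_xo; fuel-bounded (one fuel per Python iteration;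
-- within Pre_ this loop body never runs, since both parents passed to cycle_xo are ranges)
def pvInner (p1 p2 : List Int) (fuel : Nat) (index : Nat) (val1 val2 : Int)
    (o1 o2 : List (Option Int)) : List (Option Int) × List (Option Int) :=
  match fuel with
  | 0 => (o1, o2)
  | fuel + 1 =>
    if val1 ≠ val2 then
      let o1' := o1.set index (some (PySem.List.pyGetD p1 (index : Int) 0))
      let o2' := o2.set index (some (PySem.List.pyGetD p2 (index : Int) 0))
      let val2' := PySem.List.pyGetD p2 (index : Int) 0
      let index' := (PySem.List.index? p1 val2').getD 0
      pvInner p1 p2 fuel index' val1 val2' o1' o2'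
    else (o1, o2)

-- one step of the 'for element in offspring1' copy-the-rest loop: Python iterates by cursor k
-- over the list it mutates (its length never changes), reading the CURRENT element at k
def pvCopyStep (p1 p2 : List Int) (st : List (Option Int) × List (Option Int)) (k : Nat) :
    List (Option Int) × List (Option Int) :=
  let element := st.1.getD k none
  if element = none then
    let index := (PySem.List.index? st.1 none).getD 0
    if st.1.getD index none = none then
      (st.1.set index (some (PySem.List.pyGetD p2 (index : Int) 0)),
       st.2.set index (some (PySem.List.pyGetD p1 (index : Int) 0)))
    else st
  else st

-- outer 'while None in offspring1' loop of cycle_xo; fuel-bounded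
def pvOuter (p1 p2 : List Int) (fuel : Nat) (o1 o2 : List (Option Int)) :
    List (Option Int) × List (Option Int) :=
  match fuel with
  | 0 => (o1, o2)
  | fuel + 1 =>
    if none ∈ o1 then
      let index := (PySem.List.index? o1 none).getD 0
      let val1 := PySem.List.pyGetD p1 (index : Int) 0
      let val2 := PySem.List.pyGetD p2 (index : Int) 0
      let st := pvInner p1 p2 p1.length index val1 val2 o1 o2
      let st' := (List.range st.1.length).foldl (pvCopyStep p1 p2) st
      pvOuter p1 p2 fuel st'.1 st'.2
    else (o1, o2)

def pvCycleXo (p1 p2 : List Int) : List (Option Int) × List (Option Int) :=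
  pvOuter p1 p2 (p1.length + 1) (List.replicate p1.length none) (List.replicate p1.length none)

def indexes_cycle_xo (p1 : List Int) (p2 : List Int) : List Int × List Int :=
  let idx := pvCycleXo (PySem.List.pyRange 0 p1.length 1) (PySem.List.pyRange 0 p2.length 1)
  -- '[None] * len(p1)' then every position is assigned by the enumerate loop, so an Int
  -- placeholder list (0s) is observationally identical; 'bit' is an Option from cycle_xo,
  -- always 'some' on executions that return (else Python would raise on p1[None])
  let offspring1 := (PySem.List.enumerate idx.1).foldl
      (fun acc ib => acc.set ib.1.toNat (PySem.List.pyGetD p1 (ib.2.getD 0) 0))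
      (List.replicate p1.length 0)
  let offspring2 := (PySem.List.enumerate idx.2).foldl
      (fun acc ib => acc.set ib.1.toNat (PySem.List.pyGetD p2 (ib.2.getD 0) 0))
      (List.replicate p1.length 0)
  (offspring1, offspring2)

-- ===== PORT B =====
def indexes_cycle_xo_alt (p1 : List Int) (p2 : List Int) : List Int × List Int :=
  let n : Int := p1.length
  ((PySem.List.pyRange 0 n 1).map (fun i => PySem.List.pyGetD p1 i 0),
   (PySem.List.pyRange 0 n 1).map (fun i => PySem.List.pyGetD p2 i 0))

-- ===== PRECONDITION & SPEC =====
-- Pre_ excludes exactly the inputs with len(p2) < len(p1), on which BOTH A and B raise IndexError.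
def Pre_indexes_cycle_xo (p1 : List Int) (p2 : List Int) : Prop := p1.length ≤ p2.length
instance (p1 : List Int) (p2 : List Int) : Decidable (Pre_indexes_cycle_xo p1 p2) := by
  unfold Pre_indexes_cycle_xo; infer_instance
def pvWitness_indexes_cycle_xo : List Int × List Int := ([5, 6, 7], [9, 8, 7, 1])

def Spec_indexes_cycle_xo (p1 : List Int) (p2 : List Int) (out : List Int × List Int) : Prop := out = indexes_cycle_xo_alt p1 p2
instance (p1 : List Int) (p2 : List Int) (out : List Int × List Int) : Decidable (Spec_indexes_cycle_xo p1 p2 out) := by unfold Spec_indexes_cycle_xo; infer_instance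

-- ===== CLAIM (what is proved, stated in full; the proofs are below) =====
def Claim_equal_indexes_cycle_xo : Prop := ∀ (p1 : List Int) (p2 : List Int), Dom_indexes_cycle_xo p1 p2 → Pre_indexes_cycle_xo p1 p2 → Spec_indexes_cycle_xo p1 p2 (indexes_cycle_xo p1 p2)

-- ===== LEMMAS AND PROOFS =====

-- the identity index pattern the degenerate cycle crossover produces
def pvTarget (n : Nat) : List (Option Int) := (List.range n).map (fun i : Nat => some (i : Int))

theorem pvIndexNone (ys : List Int) (t : List (Option Int)) :
    PySem.List.index? (ys.map some ++ (none : Option Int) :: t) none = some ys.length := by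
  rw [PySem.List.index?_eq_some_iff]
  exact ⟨ys.map some, t, rfl, by simp, by simp⟩

theorem pvCopyFold (n m : Nat) (hnm : n ≤ m) : ∀ (r k : Nat), k + r = n →
    (List.range' k r).foldl (pvCopyStep (PySem.List.pyRange 0 n 1) (PySem.List.pyRange 0 m 1))
      ((List.range k).map (fun i : Nat => some (i : Int)) ++ List.replicate r none,
       (List.range k).map (fun i : Nat => some (i : Int)) ++ List.replicate r none)
    = (pvTarget n, pvTarget n) := by
  intro r
  induction r with
  | zero =>
    intro k hk
    obtain rfl : k = n := by omega
    rw [List.range'_zero, List.foldl_nil]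
    simp [pvTarget]
  | succ r ih =>
    intro k hk
    rw [List.range'_succ, List.foldl_cons]
    have hstep : pvCopyStep (PySem.List.pyRange 0 n 1) (PySem.List.pyRange 0 m 1)
        ((List.range k).map (fun i : Nat => some (i : Int)) ++ List.replicate (r + 1) none,
         (List.range k).map (fun i : Nat => some (i : Int)) ++ List.replicate (r + 1) none) k
        = ((List.range (k + 1)).map (fun i : Nat => some (i : Int)) ++ List.replicate r none,
           (List.range (k + 1)).map (fun i : Nat => some (i : Int)) ++ List.replicate r none) := by
      have hlen : (((List.range k).map (fun i => ((i : Nat) : Int))).map some).length = k := by simp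
      have hA : (List.range k).map (fun i : Nat => some (i : Int)) ++ List.replicate (r + 1) (none : Option Int)
          = ((List.range k).map (fun i => ((i : Nat) : Int))).map some ++ (none : Option Int) :: List.replicate r none := by
        simp [List.map_map, List.replicate_succ]
      have hel : (((List.range k).map (fun i => ((i : Nat) : Int))).map some ++ (none : Option Int) :: List.replicate r none).getD k none = none := by
        rw [List.getD_eq_getElem?_getD, List.getElem?_append_right (by simp)]
        simp
      have hv2 : PySem.List.pyGetD (PySem.List.pyRange 0 (m : Int) 1) ((k : Nat) : Int) 0 = (k : Int) := by
        rw [PySem.List.pyGetD_natCast,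
            List.getD_eq_getElem _ _ (by simp [PySem.List.length_pyRange_one]; omega),
            PySem.List.getElem_pyRange_one]
        simp
      have hv1 : PySem.List.pyGetD (PySem.List.pyRange 0 (n : Int) 1) ((k : Nat) : Int) 0 = (k : Int) := by
        rw [PySem.List.pyGetD_natCast,
            List.getD_eq_getElem _ _ (by simp [PySem.List.length_pyRange_one]; omega),
            PySem.List.getElem_pyRange_one]
        simp
      have hset : ∀ v : Option Int,
          (((List.range k).map (fun i => ((i : Nat) : Int))).map some ++ (none : Option Int) :: List.replicate r none).set k v
          = ((List.range k).map (fun i => ((i : Nat) : Int))).map some ++ v :: List.replicate r none := by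
        intro v
        rw [← hlen]
        simp
      have hkm : k < m := by omega
      have hkn : k < n := by omega
      rw [hA]
      simp only [pvCopyStep, hel, pvIndexNone, Option.getD_some, if_pos]
      simp [List.range_succ, List.map_map, hkm, hkn]
    rw [hstep]
    exact ih (k + 1) (by omega)

theorem pvInnerSame (p1 p2 : List Int) (fuel idx : Nat) (v : Int)
    (o1 o2 : List (Option Int)) : pvInner p1 p2 fuel idx v v o1 o2 = (o1, o2) := by
  cases fuel <;> simp [pvInner]

theorem pvCycleXoEq (n m : Nat) (hnm : n ≤ m) :
    pvCycleXo (PySem.List.pyRange 0 n 1) (PySem.List.pyRange 0 m 1) = (pvTarget n, pvTarget n) := by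
  unfold pvCycleXo
  have hlen1 : (PySem.List.pyRange 0 (n : Int) 1).length = n := by
    simp [PySem.List.length_pyRange_one]
  rw [hlen1]
  cases n with
  | zero => simp [pvOuter, pvTarget]
  | succ n' =>
    have hm : 0 < m := by omega
    have hp1 : PySem.List.pyRange 0 ((n' + 1 : Nat) : Int) 1
        = 0 :: PySem.List.pyRange 1 ((n' + 1 : Nat) : Int) 1 := by
      rw [PySem.List.pyRange_one_cons (by exact_mod_cast Nat.succ_pos n')]
      norm_num
    have hp2 : PySem.List.pyRange 0 (m : Int) 1 = 0 :: PySem.List.pyRange 1 (m : Int) 1 := by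
      rw [PySem.List.pyRange_one_cons (by exact_mod_cast hm)]
      norm_num
    rw [pvOuter]
    rw [if_pos (by simp)]
    have hidx : (PySem.List.index? (List.replicate (n' + 1) (none : Option Int)) none).getD 0 = 0 := by
      rw [List.replicate_succ, PySem.List.index?_cons_self]
      rfl
    have hv1 : PySem.List.pyGetD (PySem.List.pyRange 0 ((n' + 1 : Nat) : Int) 1) ((0 : Nat) : Int) 0 = 0 := by
      rw [hp1]; simp [PySem.List.pyGetD_zero_cons]
    have hv2 : PySem.List.pyGetD (PySem.List.pyRange 0 (m : Int) 1) ((0 : Nat) : Int) 0 = 0 := by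
      rw [hp2]; simp [PySem.List.pyGetD_zero_cons]
    have hfold := pvCopyFold (n' + 1) m hnm (n' + 1) 0 (by omega)
    simp only [List.range_zero, List.map_nil, List.nil_append] at hfold
    simp only [hidx, hv1, hv2, pvInnerSame, List.length_replicate, List.range_eq_range']
    rw [hfold]
    rw [pvOuter]
    rw [if_neg (by simp [pvTarget])]

theorem pvFillFold (g : Option Int → Int) :
    ∀ (xs : List (Option Int)) (pre suf : List Int), suf.length = xs.length →
    (PySem.List.enumerate xs (pre.length : Int)).foldl
      (fun acc ib => acc.set ib.1.toNat (g ib.2)) (pre ++ suf)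
    = pre ++ xs.map g := by
  intro xs
  induction xs with
  | nil =>
    intro pre suf hs
    rw [List.length_nil, List.length_eq_zero_iff] at hs
    subst hs
    simp [PySem.List.enumerate_nil]
  | cons x xs ih =>
    intro pre suf hs
    obtain ⟨y, suf', rfl⟩ : ∃ y suf', suf = y :: suf' := by
      cases suf with
      | nil => simp at hs
      | cons a b => exact ⟨a, b, rfl⟩
    rw [PySem.List.enumerate_cons, List.foldl_cons]
    have hset : (pre ++ y :: suf').set ((pre.length : Int)).toNat (g x) = (pre ++ [g x]) ++ suf' := by
      simp
    rw [hset]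
    have hstart : (pre.length : Int) + 1 = (((pre ++ [g x]).length : Nat) : Int) := by
      simp
    rw [hstart]
    rw [ih (pre ++ [g x]) suf' (by simpa using hs)]
    simp

theorem pvFillFold0 (g : Option Int → Int) (xs : List (Option Int)) (suf : List Int)
    (h : suf.length = xs.length) :
    (PySem.List.enumerate xs 0).foldl
      (fun acc ib => acc.set ib.1.toNat (g ib.2)) suf = xs.map g := by
  simpa using pvFillFold g xs [] suf h

theorem pvMain (p1 p2 : List Int) (h : p1.length ≤ p2.length) :
    indexes_cycle_xo p1 p2 = indexes_cycle_xo_alt p1 p2 := by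
  unfold indexes_cycle_xo indexes_cycle_xo_alt
  rw [pvCycleXoEq p1.length p2.length h]
  simp only [pvFillFold0 (fun b => PySem.List.pyGetD p1 (b.getD 0) 0) (pvTarget p1.length)
      (List.replicate p1.length 0) (by simp [pvTarget]),
    pvFillFold0 (fun b => PySem.List.pyGetD p2 (b.getD 0) 0) (pvTarget p1.length)
      (List.replicate p1.length 0) (by simp [pvTarget])]
  simp [pvTarget, List.map_map, PySem.List.pyRange_one, Function.comp]

-- ===== VERDICT (by name: the statement is the Claim_ definition above) =====
theorem indexes_cycle_xo_spec : Claim_equal_indexes_cycle_xo := by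
  intro p1 p2 _ hpre
  unfold Spec_indexes_cycle_xo
  exact pvMain p1 p2 hpre
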